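-- pv_equiv track=rewrite | github.com/Choukette-offi/Liaison_V1 | INIT_PROG/TP8b listes, dictionnaires, ensembles-20241106/troupeaux.py | le_plus_represente
-- ===== SOURCE A (Python) =====
-- def le_plus_represente(troupeau):
--     """ Recherche le nom de l'animal qui a le plus d'individus dans le troupeau
--
--     Args:
--         troupeau (dict): un dictionnaire modélisant un troupeau {nom_animaux: nombre}
--
--     Returns:
--         str: le nom de l'animal qui a le plus d'individus  dans le troupeau
--         None si le troupeau est vide)
--
--     """
--     nom = None
--     maxi = 0
--     for val in troupeau.items():
--         if val[1] > maxi: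
--             maxi = val[1]
--             nom = val[0]
--     return nom
-- ===== SOURCE B (Python) =====
-- def le_plus_represente(troupeau):
--     ranked = sorted(troupeau.items(), key=lambda p: p[1], reverse=True)
--     if ranked and ranked[0][1] > 0:
--         return ranked[0][0]
--     return None
-- ===== Notes on version B (the rewrite author's own statement) =====
-- stated objective: alternative
-- what changed: Replaced A's single-pass running-max accumulator loop by sort-then-pick: stable reverse-sort the items by count and inspect the head (its stability reproduces A's first-maximal tie-break; a nonpositive or absent head yields None).
import Mathlib
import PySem

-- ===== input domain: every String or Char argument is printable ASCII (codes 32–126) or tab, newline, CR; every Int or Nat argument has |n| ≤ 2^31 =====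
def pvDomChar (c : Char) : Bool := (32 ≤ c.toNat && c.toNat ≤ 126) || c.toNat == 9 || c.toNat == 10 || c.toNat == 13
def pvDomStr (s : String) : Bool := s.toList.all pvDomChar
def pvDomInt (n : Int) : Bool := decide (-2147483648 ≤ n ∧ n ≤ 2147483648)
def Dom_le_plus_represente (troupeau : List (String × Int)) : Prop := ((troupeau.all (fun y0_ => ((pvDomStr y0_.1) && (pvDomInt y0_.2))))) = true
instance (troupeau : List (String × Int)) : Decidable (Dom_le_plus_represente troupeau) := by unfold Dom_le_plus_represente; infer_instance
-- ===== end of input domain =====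

-- B replaces A's single-pass running-max accumulator loop by sort-then-pick: stable reverse-sort
-- the items by count and inspect the head. Same values everywhere; B pays an O(n log n) sort.


-- ===== PORT A =====
-- A's loop body: 'if val[1] > maxi: maxi = val[1]; nom = val[0]' on the state (nom, maxi)
def stepA (st : Option String × Int) (val : String × Int) : Option String × Int :=
  if st.2 < val.2 then (some val.1, val.2) else st

-- the dict argument arrives as an association list; Python's dict construction collapses
-- duplicate keys (overwrite in place), which PySem.Dict.ofList reproduces; A then folds over items()
def le_plus_represente (troupeau : List (String × Int)) : Option String :=
  ((PySem.Dict.ofList troupeau).items.foldl stepA (none, 0)).1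

-- ===== PORT B =====
-- ranked = sorted(troupeau.items(), key=lambda p: p[1], reverse=True)
-- return ranked[0][0] if ranked and ranked[0][1] > 0 else None
def le_plus_represente_alt (troupeau : List (String × Int)) : Option String :=
  let ranked := PySem.List.sorted (PySem.Dict.ofList troupeau).items (fun p => p.2) true
  match ranked with
  | [] => none
  | p :: _ => if 0 < p.2 then some p.1 else none

-- ===== PRECONDITION & SPEC =====
def Spec_le_plus_represente (troupeau : List (String × Int)) (out : Option String) : Prop := out = le_plus_represente_alt troupeau
instance (troupeau : List (String × Int)) (out : Option String) : Decidable (Spec_le_plus_represente troupeau out) := by unfold Spec_le_plus_represente; infer_instance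

-- ===== CLAIM (what is proved, stated in full; the proofs are below) =====
def Claim_equal_le_plus_represente : Prop := ∀ (troupeau : List (String × Int)), Dom_le_plus_represente troupeau → Spec_le_plus_represente troupeau (le_plus_represente troupeau)

-- ===== LEMMAS AND PROOFS =====

-- running strict max with first-occurrence tie-break, as an optional accumulator
def gmax (acc : Option (String × Int)) (x : String × Int) : Option (String × Int) :=
  match acc with
  | none => some x
  | some m => if m.2 < x.2 then some x else some m

-- A's loop state as a view of the gmax accumulator (A forgets nonpositive maxima)
def convA (acc : Option (String × Int)) : Option String × Int :=
  match acc with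
  | none => (none, 0)
  | some m => if 0 < m.2 then (some m.1, m.2) else (none, 0)

lemma foldA_eq_gmax (l : List (String × Int)) :
    ∀ acc : Option (String × Int), l.foldl stepA (convA acc) = convA (l.foldl gmax acc) := by
  induction l with
  | nil => intro acc; rfl
  | cons x t ih =>
    intro acc
    have hstep : stepA (convA acc) x = convA (gmax acc x) := by
      cases acc with
      | none =>
        by_cases hx : 0 < x.2 <;> simp [stepA, convA, gmax, hx]
      | some m =>
        by_cases hm : 0 < m.2 <;> by_cases hlt : m.2 < x.2 <;>
          simp [stepA, convA, gmax, hm, hlt] <;> omega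
    simp only [List.foldl_cons, hstep, ih (gmax acc x)]

-- the head of a stable descending insertion equals the running strict max of head and new element
lemma head_insertBy (x : String × Int) (acc : List (String × Int)) :
    (PySem.List.insertBy (fun a b => decide (b.2 < a.2)) x acc).head? = gmax acc.head? x := by
  cases acc with
  | nil => rfl
  | cons h t =>
    by_cases hlt : h.2 < x.2 <;> simp [PySem.List.insertBy, gmax, hlt]

lemma head_foldl_insertBy (l : List (String × Int)) :
    ∀ acc : List (String × Int),
    (l.foldl (fun acc x => PySem.List.insertBy (fun a b => decide (b.2 < a.2)) x acc) acc).head?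
      = l.foldl gmax acc.head? := by
  induction l with
  | nil => intro acc; rfl
  | cons x t ih =>
    intro acc
    simp only [List.foldl_cons, ih, head_insertBy]

lemma main_eq (troupeau : List (String × Int)) :
    le_plus_represente troupeau = le_plus_represente_alt troupeau := by
  set l := (PySem.Dict.ofList troupeau).items with hl
  have hA : le_plus_represente troupeau = (convA (l.foldl gmax none)).1 := by
    unfold le_plus_represente
    rw [← hl, show ((none, 0) : Option String × Int) = convA none from rfl,
      foldA_eq_gmax l none]
  have hsorted : (PySem.List.sorted l (fun p => p.2) true).head? = l.foldl gmax none := by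
    rw [PySem.List.sorted_rev_eq_foldl_insertBy l (fun p => p.2)]
    exact head_foldl_insertBy l []
  unfold le_plus_represente_alt
  rw [← hl]
  rw [hA]
  cases hr : PySem.List.sorted l (fun p => p.2) true with
  | nil =>
    rw [hr] at hsorted
    simp only [List.head?_nil] at hsorted
    rw [← hsorted]
    rfl
  | cons p t =>
    rw [hr] at hsorted
    simp only [List.head?_cons] at hsorted
    rw [← hsorted]
    by_cases hp : 0 < p.2 <;> simp [convA, hp]

-- ===== VERDICT (by name: the statement is the Claim_ definition above) =====
theorem le_plus_represente_spec : Claim_equal_le_plus_represente := by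
  intro troupeau _
  show le_plus_represente troupeau = le_plus_represente_alt troupeau
  exact main_eq troupeau
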